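-- pv_equiv track=rewrite | github.com/TreB1eN/Deformable_Convolution_V2_Pytorch1.0 | modeling/feature_mimicking/mimicking.py | concat_ids
-- ===== SOURCE A (Python) =====
-- def concat_ids(mimicking_ids):
--     ids = mimicking_ids.copy()
--     for i in range(len(ids)):
--         for j in range(i + 1, len(ids)):
--             ids[j] = [id_ + len(ids[i]) for id_ in ids[j]]
--     new_ids = []
--     for id_ in ids:
--         new_ids += id_
--     return new_ids
-- ===== SOURCE B (Python) =====
-- def concat_ids(mimicking_ids):
--     new_ids = []
--     offset = 0
--     for sub in mimicking_ids:
--         for x in sub: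
--             new_ids.append(x + offset)
--         offset += len(sub)
--     return new_ids
-- ===== Notes on version B (the rewrite author's own statement) =====
-- stated objective: faster
-- what changed: Replaced the nested index loops that repeatedly rebuild every later sublist with a single pass keeping a running cumulative-length offset added to each element while flattening.
import Mathlib
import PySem

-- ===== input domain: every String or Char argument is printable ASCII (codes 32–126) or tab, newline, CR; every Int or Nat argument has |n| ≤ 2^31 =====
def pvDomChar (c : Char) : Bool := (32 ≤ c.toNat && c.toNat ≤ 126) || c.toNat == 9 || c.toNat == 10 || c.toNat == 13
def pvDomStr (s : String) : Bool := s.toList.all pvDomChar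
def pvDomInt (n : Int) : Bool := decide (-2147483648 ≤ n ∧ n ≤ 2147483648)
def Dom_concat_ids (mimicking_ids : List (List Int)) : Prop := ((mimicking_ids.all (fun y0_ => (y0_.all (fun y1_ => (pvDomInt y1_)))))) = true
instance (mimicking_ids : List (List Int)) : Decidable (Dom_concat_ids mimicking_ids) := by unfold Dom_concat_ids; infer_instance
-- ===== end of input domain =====

-- B replaces A's O(k*N) nested index loops by one O(N) pass with a running cumulative-length offset (faster).


-- ===== PORT A =====
-- inner loop body: ids[j] = [id_ + len(ids[i]) for id_ in ids[j]]
def pvInnerStep (i : Nat) (ids : List (List Int)) (j : Nat) : List (List Int) :=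
  ids.set j ((ids.getD j []).map (fun id_ => id_ + ((ids.getD i []).length : Int)))

-- outer loop body: for j in range(i + 1, len(ids)): ...
def pvOuterStep (ids : List (List Int)) (i : Nat) : List (List Int) :=
  (List.range' (i + 1) (ids.length - (i + 1))).foldl (pvInnerStep i) ids

def concat_ids (mimicking_ids : List (List Int)) : List Int :=
  ((List.range mimicking_ids.length).foldl pvOuterStep mimicking_ids).foldl
    (fun new_ids id_ => new_ids ++ id_) []

-- ===== PORT B =====
-- single pass: state = (new_ids, offset); append each element plus offset, then bump offset by len(sub)
def concat_ids_alt (mimicking_ids : List (List Int)) : List Int :=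
  (mimicking_ids.foldl
    (fun (st : List Int × Int) sub =>
      (sub.foldl (fun new_ids x => new_ids ++ [x + st.2]) st.1, st.2 + (sub.length : Int)))
    ([], 0)).1

-- ===== PRECONDITION & SPEC =====
def Spec_concat_ids (mimicking_ids : List (List Int)) (out : List Int) : Prop := out = concat_ids_alt mimicking_ids
instance (mimicking_ids : List (List Int)) (out : List Int) : Decidable (Spec_concat_ids mimicking_ids out) := by unfold Spec_concat_ids; infer_instance

-- ===== CLAIM (what is proved, stated in full; the proofs are below) =====
def Claim_equal_concat_ids : Prop := ∀ (mimicking_ids : List (List Int)), Dom_concat_ids mimicking_ids → Spec_concat_ids mimicking_ids (concat_ids mimicking_ids)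

-- ===== LEMMAS AND PROOFS =====

-- reference shape: each sublist shifted by the sum of lengths of the preceding ones
def pvFin (off : Int) : List (List Int) → List (List Int)
  | [] => []
  | s :: rest => s.map (fun x => x + off) :: pvFin (off + (s.length : Int)) rest

theorem pvFin_length (off : Int) (l : List (List Int)) : (pvFin off l).length = l.length := by
  induction l generalizing off with
  | nil => rfl
  | cons s rest ih => simp [pvFin, ih]

theorem pvFin_append_single (off : Int) (l : List (List Int)) (x : List Int) :
    pvFin off (l ++ [x]) = pvFin off l ++ [x.map (fun y => y + (off + ((l.map fun s => (s.length : Int)).sum)))] := by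
  induction l generalizing off with
  | nil => simp [pvFin]
  | cons s rest ih =>
    simp only [List.cons_append, pvFin, ih, List.map_cons, List.sum_cons]
    rw [add_assoc]

-- set / getD on a concatenation
theorem pv_set_middle (pre : List (List Int)) (x : List Int) (suf : List (List Int)) (v : List Int) :
    (pre ++ x :: suf).set pre.length v = pre ++ v :: suf := by
  induction pre with
  | nil => rfl
  | cons a l ih => simp [ih]

theorem pv_getD_left (pre suf : List (List Int)) (i : Nat) (h : i < pre.length) :
    (pre ++ suf).getD i [] = pre.getD i [] := by
  simp [List.getD, List.getElem?_append_left h]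

theorem pv_getD_mid (pre : List (List Int)) (x : List Int) (suf : List (List Int)) :
    (pre ++ x :: suf).getD pre.length [] = x := by
  simp [List.getD]

-- the inner loop maps (+ len ids[i]) over every position past the prefix
theorem pv_inner_gen (i : Nat) (suf : List (List Int)) :
    ∀ (pre : List (List Int)), i < pre.length →
    (List.range' pre.length suf.length).foldl (pvInnerStep i) (pre ++ suf)
      = pre ++ suf.map (List.map (fun x => x + (((pre.getD i []).length : Int)))) := by
  induction suf with
  | nil => intro pre _; simp
  | cons x rest ih =>
    intro pre hi
    have hstep : pvInnerStep i (pre ++ x :: rest) pre.length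
        = (pre ++ [x.map (fun y => y + (((pre.getD i []).length : Int)))]) ++ rest := by
      simp only [pvInnerStep, pv_getD_mid, pv_getD_left _ _ i hi]
      rw [pv_set_middle]
      simp
    have hlen : (pre ++ [x.map (fun y => y + (((pre.getD i []).length : Int)))]).length = pre.length + 1 := by
      simp
    have hi' : i < (pre ++ [x.map (fun y => y + (((pre.getD i []).length : Int)))]).length := by
      simp; omega
    have hget : (pre ++ [x.map (fun y => y + (((pre.getD i []).length : Int)))]).getD i []
        = pre.getD i [] := pv_getD_left _ _ i hi
    simp only [List.length_cons]
    rw [List.range'_succ, List.foldl_cons, hstep]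
    have := ih (pre ++ [x.map (fun y => y + (((pre.getD i []).length : Int)))]) hi'
    rw [hlen] at this
    rw [this, hget]
    simp

-- outer loop invariant: after m iterations, the first m sublists are final and the rest carry offset = sum of the first m lengths
theorem pv_outer_gen (orig : List (List Int)) :
    ∀ m : Nat, m ≤ orig.length →
    (List.range m).foldl pvOuterStep orig
      = pvFin 0 (orig.take m)
        ++ (orig.drop m).map (List.map (fun x => x + (((orig.take m).map fun s => (s.length : Int)).sum))) := by
  intro m
  induction m with
  | zero => intro _; simp [pvFin]
  | succ m ih =>
    intro hm
    have hm' : m ≤ orig.length := by omega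
    have hmlt : m < orig.length := by omega
    rw [List.range_succ, List.foldl_append, List.foldl_cons, List.foldl_nil, ih hm']
    set c : Int := (((orig.take m).map fun s => (s.length : Int)).sum) with hc
    obtain ⟨x, hx⟩ : ∃ x, orig.drop m = x :: orig.drop (m + 1) := by
      refine ⟨orig[m], ?_⟩
      rw [List.drop_eq_getElem_cons hmlt]
    set A := pvFin 0 (orig.take m) with hA
    have hAlen : A.length = m := by
      rw [hA, pvFin_length, List.length_take]; omega
    set g := List.map (fun x : Int => x + c) with hg
    have hsplit : A ++ (orig.drop m).map g = (A ++ [g x]) ++ (orig.drop (m + 1)).map g := by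
      rw [hx]; simp
    have hslen : ((orig.drop (m + 1)).map g).length = orig.length - (m + 1) := by
      simp
    have hprelen : (A ++ [g x]).length = m + 1 := by simp [hAlen]
    have hilt : m < (A ++ [g x]).length := by simp [hAlen]
    have hgetm : (A ++ [g x]).getD m [] = g x := by
      have : A ++ [g x] = A ++ (g x) :: ([] : List (List Int)) := by simp
      rw [this, hAlen.symm] at *
      exact pv_getD_mid A (g x) []
    have houter : pvOuterStep (A ++ (orig.drop m).map g) m
        = (A ++ [g x]) ++ ((orig.drop (m + 1)).map g).map (List.map (fun y => y + ((x.length : Int)))) := by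
      rw [hsplit, pvOuterStep]
      have hlentot : ((A ++ [g x]) ++ (orig.drop (m + 1)).map g).length = orig.length := by
        simp [hAlen]; omega
      rw [hlentot]
      have := pv_inner_gen m ((orig.drop (m + 1)).map g) (A ++ [g x]) hilt
      rw [hprelen] at this
      rw [hslen] at this
      rw [this, hgetm]
      simp [hg]
    rw [houter]
    -- now assemble the (m+1) form
    have hxm : orig[m] = x := by
      have h2 := hx
      rw [List.drop_eq_getElem_cons hmlt] at h2
      exact (List.cons.injEq _ _ _ _ ▸ h2).1
    have htake : orig.take (m + 1) = orig.take m ++ [x] := by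
      rw [← hxm, ← List.take_concat_get' _ _ hmlt]
    have hfin : A ++ [g x] = pvFin 0 (orig.take (m + 1)) := by
      rw [htake, pvFin_append_single, zero_add, ← hc, ← hA, hg]
    have hoff : (((orig.take (m + 1)).map fun s => (s.length : Int)).sum) = c + (x.length : Int) := by
      rw [htake]; simp [hc]
    rw [hfin, hoff]
    congr 1
    rw [List.map_map]
    congr 1
    funext l
    simp [hg, List.map_map]

theorem pv_foldl_append (l : List (List Int)) :
    ∀ acc : List Int, l.foldl (fun a b => a ++ b) acc = acc ++ l.flatten := by
  induction l with
  | nil => intro acc; simp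
  | cons x rest ih => intro acc; simp [ih]

theorem pv_concat_ids_eq (m : List (List Int)) : concat_ids m = (pvFin 0 m).flatten := by
  unfold concat_ids
  have h := pv_outer_gen m m.length (le_refl _)
  simp only [List.take_length, List.drop_length, List.map_nil, List.append_nil] at h
  rw [h, pv_foldl_append]
  simp

theorem pv_inner_foldl (s : List Int) (off : Int) :
    ∀ acc : List Int, s.foldl (fun a x => a ++ [x + off]) acc = acc ++ s.map (fun x => x + off) := by
  induction s with
  | nil => intro acc; simp
  | cons x rest ih => intro acc; simp [ih]

theorem pv_alt_gen (m : List (List Int)) :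
    ∀ (acc : List Int) (off : Int),
    (m.foldl (fun (st : List Int × Int) sub =>
        (sub.foldl (fun new_ids x => new_ids ++ [x + st.2]) st.1, st.2 + (sub.length : Int)))
      (acc, off)).1 = acc ++ (pvFin off m).flatten := by
  induction m with
  | nil => intro acc off; simp [pvFin]
  | cons s rest ih =>
    intro acc off
    rw [List.foldl_cons]
    change (rest.foldl (fun (st : List Int × Int) sub =>
        (sub.foldl (fun new_ids x => new_ids ++ [x + st.2]) st.1, st.2 + (sub.length : Int)))
        (s.foldl (fun new_ids x => new_ids ++ [x + off]) acc, off + (s.length : Int))).1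
        = acc ++ (pvFin off (s :: rest)).flatten
    rw [pv_inner_foldl, ih]
    simp [pvFin]

theorem pv_alt_eq (m : List (List Int)) : concat_ids_alt m = (pvFin 0 m).flatten := by
  unfold concat_ids_alt
  rw [pv_alt_gen]
  simp

-- ===== VERDICT (by name: the statement is the Claim_ definition above) =====
theorem concat_ids_spec : Claim_equal_concat_ids := by
  intro m _
  unfold Spec_concat_ids
  rw [pv_concat_ids_eq, pv_alt_eq]
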